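-- pv_equiv track=rewrite | github.com/JSHUH0401/CodingTest_Practice | 붕대감기(lv1).py | solution
-- ===== SOURCE A (Python) =====
-- def solution(bandage, health, attacks):
--     #총 턴 횟수
--     dead = False
--     length = attacks[-1][0]
--     max_health = health
--     con_att = 0 #연공 변수
--     att_timing = []
--
--     for n in attacks:
--         att_timing.append(n[0])
--     for i in range(length+1):
--         #만약 공격을 당하는 경우
-- #        for k in attacks:
--         if i in att_timing:
--             for k in attacks:
--                 if i == k[0]:
--                     damage = k[1]
--                     con_att = 0
--                     health -= damage
--                     if health <= 0:
--                         dead = True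
--         else:
--             con_att += 1
--             health += bandage[1]
--             if con_att == bandage[0]:
--                 health += bandage[2]
--                 con_att = 0
--             health = min(health,max_health)
--     if dead == True:
--         health = -1
--     return health
-- ===== SOURCE B (Python) =====
-- def solution(bandage, health, attacks):
--     # Group the damages by attack time in a dict built once, then make a single
--     # pass over the turns with dict lookups, returning -1 as soon as death occurs.
--     length = attacks[-1][0]
--     max_health = health
--     by_time = {}
--     for k in attacks:
--         by_time.setdefault(k[0], []).append(k[1])
--     t_heal, x_heal, y_heal = bandage[0], bandage[1], bandage[2]
--     con = 0
--     for i in range(length + 1):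
--         damages = by_time.get(i)
--         if damages is not None:
--             con = 0
--             for d in damages:
--                 health -= d
--                 if health <= 0:
--                     return -1
--         else:
--             con += 1
--             health += x_heal
--             if con == t_heal:
--                 health += y_heal
--                 con = 0
--             health = min(health, max_health)
--     return health
-- ===== Notes on version B (the rewrite author's own statement) =====
-- stated objective: alternative
-- what changed: B groups the attack damages by time into a dict built once and then makes a single pass over the turns with dict lookups, returning -1 immediately on death, instead of A's per-turn membership test on att_timing plus a rescan of the whole attack list on every attack turn.
-- outside the precondition, e.g. on solution([], 5, [[0, 3]]): A returns 2, B raises IndexError; on solution([1, 1, 1], 5, [[-1], [0, 2]]): A returns 3, B raises IndexError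
import Mathlib
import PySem

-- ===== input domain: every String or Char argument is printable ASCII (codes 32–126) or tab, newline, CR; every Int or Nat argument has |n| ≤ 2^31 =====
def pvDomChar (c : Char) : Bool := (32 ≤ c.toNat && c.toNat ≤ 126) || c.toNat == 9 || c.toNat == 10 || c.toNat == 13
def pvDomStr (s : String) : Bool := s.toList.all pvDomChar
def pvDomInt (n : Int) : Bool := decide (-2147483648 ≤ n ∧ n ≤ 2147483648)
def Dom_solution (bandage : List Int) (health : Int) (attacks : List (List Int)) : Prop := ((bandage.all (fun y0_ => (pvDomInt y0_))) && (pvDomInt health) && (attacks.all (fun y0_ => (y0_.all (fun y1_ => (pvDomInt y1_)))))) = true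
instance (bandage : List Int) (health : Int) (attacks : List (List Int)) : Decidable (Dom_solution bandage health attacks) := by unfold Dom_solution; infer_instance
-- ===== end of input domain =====

-- B restructures the algorithm: damages grouped by time in a dict built once, one pass over
-- the turns with dict lookups and an early return -1 on death (A rescans the attack list).

-- ===== PORT A =====
-- literal transliteration of A: att_timing list, per-turn membership test, inner rescan of attacks
def solution (bandage : List Int) (health : Int) (attacks : List (List Int)) : Int :=
  let length := PySem.List.pyGetD (PySem.List.pyGetD attacks (-1) []) 0 0
  let max_health := health
  let att_timing := attacks.foldl (fun acc n => acc ++ [PySem.List.pyGetD n 0 0]) []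
  let s := (PySem.List.pyRange 0 (length + 1) 1).foldl
    (fun (st : Bool × Int × Int) i =>
      if i ∈ att_timing then
        attacks.foldl
          (fun (st2 : Bool × Int × Int) k =>
            if i = PySem.List.pyGetD k 0 0 then
              let damage := PySem.List.pyGetD k 1 0
              let health := st2.2.1 - damage
              let dead := if health ≤ 0 then true else st2.1
              (dead, health, 0)
            else st2) st
      else
        let con_att := st.2.2 + 1
        let health := st.2.1 + PySem.List.pyGetD bandage 1 0
        let p :=
          if con_att = PySem.List.pyGetD bandage 0 0 then
            (health + PySem.List.pyGetD bandage 2 0, (0 : Int))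
          else (health, con_att)
        (st.1, min p.1 max_health, p.2))
    (false, health, 0)
  if s.1 then -1 else s.2.1

-- ===== PORT B =====
-- 'for d in damages: health -= d; if health <= 0: return -1' (none = early return -1)
def applyDamages : List Int → Int → Option Int
  | [], h => some h
  | d :: ds, h =>
    let h' := h - d
    if h' ≤ 0 then none else applyDamages ds h'

-- the single pass over the turn list, with early return -1 on death
def runB (byTime : PySem.Dict Int (List Int)) (tHeal xHeal yHeal maxHealth : Int) :
    List Int → Int → Int → Int
  | [], h, _ => h
  | i :: rest, h, con =>
    match byTime.get? i with
    | some ds =>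
      match applyDamages ds h with
      | none => -1
      | some h' => runB byTime tHeal xHeal yHeal maxHealth rest h' 0
    | none =>
      let con := con + 1
      let h := h + xHeal
      let p := if con = tHeal then (h + yHeal, (0 : Int)) else (h, con)
      runB byTime tHeal xHeal yHeal maxHealth rest (min p.1 maxHealth) p.2

def solution_alt (bandage : List Int) (health : Int) (attacks : List (List Int)) : Int :=
  let length := PySem.List.pyGetD (PySem.List.pyGetD attacks (-1) []) 0 0
  let byTime : PySem.Dict Int (List Int) :=
    attacks.foldl
      (fun d k => d.modify (PySem.List.pyGetD k 0 0) [] (· ++ [PySem.List.pyGetD k 1 0]))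
      PySem.Dict.empty
  runB byTime (PySem.List.pyGetD bandage 0 0) (PySem.List.pyGetD bandage 1 0)
    (PySem.List.pyGetD bandage 2 0) health (PySem.List.pyRange 0 (length + 1) 1) health 0

-- ===== PRECONDITION & SPEC =====
-- Pre_ excludes the inputs where A raises IndexError (empty attacks, a scanned short row,
-- a short bandage read on a healing turn), plus the degenerate inputs on which A avoids
-- those reads only accidentally (short bandage with no healing turn; a length-1 row whose
-- time is never reached), where B's upfront reads raise.
def Pre_solution (bandage : List Int) (health : Int) (attacks : List (List Int)) : Prop :=
  attacks ≠ [] ∧ 3 ≤ bandage.length ∧ ∀ k ∈ attacks, 2 ≤ k.length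
instance (bandage : List Int) (health : Int) (attacks : List (List Int)) : Decidable (Pre_solution bandage health attacks) := by unfold Pre_solution; infer_instance

def pvWitness_solution : List Int × Int × List (List Int) := ([1, 1, 1], 5, [[1, 1]])

def Spec_solution (bandage : List Int) (health : Int) (attacks : List (List Int)) (out : Int) : Prop := out = solution_alt bandage health attacks
instance (bandage : List Int) (health : Int) (attacks : List (List Int)) (out : Int) : Decidable (Spec_solution bandage health attacks out) := by unfold Spec_solution; infer_instance

-- ===== CLAIM (what is proved, stated in full; the proofs are below) =====
def Claim_equal_solution : Prop := ∀ (bandage : List Int) (health : Int) (attacks : List (List Int)), Dom_solution bandage health attacks → Pre_solution bandage health attacks → Spec_solution bandage health attacks (solution bandage health attacks)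

-- ===== LEMMAS AND PROOFS =====
-- proof-side defs
def pvKey (k : List Int) : Int := PySem.List.pyGetD k 0 0
def pvDmg (k : List Int) : Int := PySem.List.pyGetD k 1 0
def pvFl (attacks : List (List Int)) (i : Int) : List (List Int) :=
  attacks.filter (fun k => decide (i = pvKey k))
def pvDs (attacks : List (List Int)) (i : Int) : List Int := (pvFl attacks i).map pvDmg
def foldPair (ds : List Int) (p : Bool × Int) : Bool × Int :=
  ds.foldl (fun p dm => ((if p.2 - dm ≤ 0 then true else p.1), p.2 - dm)) p
def pvByTime (attacks : List (List Int)) : PySem.Dict Int (List Int) :=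
  attacks.foldl
    (fun d k => d.modify (PySem.List.pyGetD k 0 0) [] (· ++ [PySem.List.pyGetD k 1 0]))
    PySem.Dict.empty
def AstepAtt (attacks : List (List Int)) (i : Int) (st : Bool × Int × Int) : Bool × Int × Int :=
  attacks.foldl
    (fun (st2 : Bool × Int × Int) k =>
      if i = PySem.List.pyGetD k 0 0 then
        let damage := PySem.List.pyGetD k 1 0
        let health := st2.2.1 - damage
        let dead := if health ≤ 0 then true else st2.1
        (dead, health, 0)
      else st2) st
def Astep (bandage : List Int) (max_health : Int) (attacks : List (List Int))
    (att_timing : List Int) (st : Bool × Int × Int) (i : Int) : Bool × Int × Int :=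
  if i ∈ att_timing then AstepAtt attacks i st
  else
    let con_att := st.2.2 + 1
    let health := st.2.1 + PySem.List.pyGetD bandage 1 0
    let p :=
      if con_att = PySem.List.pyGetD bandage 0 0 then
        (health + PySem.List.pyGetD bandage 2 0, (0 : Int))
      else (health, con_att)
    (st.1, min p.1 max_health, p.2)
def Afold (bandage : List Int) (max_health : Int) (attacks : List (List Int))
    (att_timing : List Int) (L : List Int) (st : Bool × Int × Int) : Bool × Int × Int :=
  L.foldl (Astep bandage max_health attacks att_timing) st

lemma Afold_cons (bandage : List Int) (mh : Int) (attacks : List (List Int)) (tm : List Int)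
    (i : Int) (L : List Int) (st : Bool × Int × Int) :
    Afold bandage mh attacks tm (i :: L) st
      = Afold bandage mh attacks tm L (Astep bandage mh attacks tm st i) := rfl

lemma solution_eq (bandage : List Int) (health : Int) (attacks : List (List Int)) :
    solution bandage health attacks =
      (let s := Afold bandage health attacks
        (attacks.foldl (fun acc n => acc ++ [PySem.List.pyGetD n 0 0]) [])
        (PySem.List.pyRange 0 ((PySem.List.pyGetD (PySem.List.pyGetD attacks (-1) []) 0 0) + 1) 1)
        (false, health, 0);
       if s.1 then -1 else s.2.1) := rfl

lemma solution_alt_eq (bandage : List Int) (health : Int) (attacks : List (List Int)) :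
    solution_alt bandage health attacks =
      runB (pvByTime attacks) (PySem.List.pyGetD bandage 0 0) (PySem.List.pyGetD bandage 1 0)
        (PySem.List.pyGetD bandage 2 0) health
        (PySem.List.pyRange 0 ((PySem.List.pyGetD (PySem.List.pyGetD attacks (-1) []) 0 0) + 1) 1)
        health 0 := rfl

lemma foldPair_cons (x : Int) (ds : List Int) (d : Bool) (h : Int) :
    foldPair (x :: ds) (d, h) = foldPair ds ((if h - x ≤ 0 then true else d), h - x) := rfl

lemma foldPair_fst_true (ds : List Int) : ∀ (h : Int), (foldPair ds (true, h)).1 = true := by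
  induction ds with
  | nil => intro h; rfl
  | cons x t ih =>
    intro h
    rw [foldPair_cons]
    split <;> exact ih _

lemma innerA_fl (fl : List (List Int)) : ∀ (d : Bool) (h c : Int),
    fl.foldl
      (fun (st2 : Bool × Int × Int) k =>
        let damage := PySem.List.pyGetD k 1 0
        let health := st2.2.1 - damage
        let dead := if health ≤ 0 then true else st2.1
        (dead, health, 0)) (d, h, c)
    = ((foldPair (fl.map pvDmg) (d, h)).1, (foldPair (fl.map pvDmg) (d, h)).2,
        if fl = [] then c else 0) := by
  induction fl with
  | nil => intro d h c; rfl
  | cons k t ih =>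
    intro d h c
    simp only [List.foldl_cons, List.map_cons]
    rw [ih, foldPair_cons]
    simp only [pvDmg, ite_self]
    simp

lemma innerA_eq (attacks : List (List Int)) (i : Int) (d : Bool) (h c : Int) :
    AstepAtt attacks i (d, h, c)
    = ((foldPair (pvDs attacks i) (d, h)).1, (foldPair (pvDs attacks i) (d, h)).2,
        if pvFl attacks i = [] then c else 0) := by
  unfold AstepAtt
  rw [PySem.List.foldl_ite_eq_foldl_filter (p := fun k => i = PySem.List.pyGetD k 0 0)]
  exact innerA_fl (pvFl attacks i) d h c

lemma applyDamages_eq (ds : List Int) : ∀ (h : Int),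
    applyDamages ds h =
      if (foldPair ds (false, h)).1 = true then none else some ((foldPair ds (false, h)).2) := by
  induction ds with
  | nil => intro h; rfl
  | cons x t ih =>
    intro h
    by_cases hle : h - x ≤ 0
    · have h1 : (foldPair (x :: t) (false, h)).1 = true := by
        rw [foldPair_cons, if_pos hle]; exact foldPair_fst_true t _
      simp only [applyDamages, if_pos hle, h1]
      simp
    · have h2 : foldPair (x :: t) (false, h) = foldPair t (false, h - x) := by
        rw [foldPair_cons, if_neg hle]
      simp only [applyDamages, if_neg hle, h2]
      exact ih _

lemma mem_map_key_iff (attacks : List (List Int)) (i : Int) :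
    i ∈ attacks.map pvKey ↔ pvFl attacks i ≠ [] := by
  rw [List.mem_map]
  constructor
  · rintro ⟨k, hk, rfl⟩ hnil
    have hmem : k ∈ pvFl attacks (pvKey k) := List.mem_filter.mpr ⟨hk, by simp⟩
    simp [hnil] at hmem
  · intro hne
    rcases List.exists_mem_of_ne_nil _ hne with ⟨k, hk⟩
    have h2 := List.mem_filter.mp hk
    exact ⟨k, h2.1, (of_decide_eq_true h2.2).symm⟩

lemma byTime_get? (attacks : List (List Int)) (i : Int) :
    (pvByTime attacks).get? i =
      if pvFl attacks i = [] then none else some (pvDs attacks i) := by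
  have hfold : pvByTime attacks =
      (attacks.map (fun k => (pvKey k, pvDmg k))).foldl
        (fun d p => d.modify p.1 [] (· ++ [p.2])) PySem.Dict.empty := by
    rw [List.foldl_map]
    rfl
  have hkeys : (pvByTime attacks).keys = PySem.Set.ofList (attacks.map pvKey) := by
    unfold pvByTime
    rw [PySem.Dict.keys_foldl_modify_key attacks (fun k => PySem.List.pyGetD k 0 0) []
      (fun _ k => (· ++ [PySem.List.pyGetD k 1 0])) PySem.Dict.empty]
    rw [PySem.Dict.keys_empty]
    rfl
  have hgetD : (pvByTime attacks).getD i [] = pvDs attacks i := by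
    rw [hfold, PySem.Dict.getD_foldl_modify_append]
    rw [PySem.Dict.getD_empty, List.nil_append, List.filter_map, List.map_map]
    unfold pvDs pvFl
    congr 1
    apply List.filter_congr
    intro k _
    by_cases h : i = pvKey k
    · simp [h]
    · simp [h, Ne.symm h]
  by_cases hfl : pvFl attacks i = []
  · rw [if_pos hfl]
    rw [PySem.Dict.get?_eq_none_iff_contains, Bool.eq_false_iff, Ne,
      PySem.Dict.contains_iff_mem_keys, hkeys, PySem.Set.mem_ofList, mem_map_key_iff]
    simp [hfl]
  · rw [if_neg hfl]
    have hc : (pvByTime attacks).contains i = true := by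
      rw [PySem.Dict.contains_iff_mem_keys, hkeys, PySem.Set.mem_ofList]
      exact (mem_map_key_iff attacks i).mpr hfl
    rw [PySem.Dict.contains_eq_isSome_get?] at hc
    rcases Option.isSome_iff_exists.mp hc with ⟨v, hv⟩
    rw [hv]
    rw [PySem.Dict.getD_of_get?_eq_some _ [] hv] at hgetD
    rw [hgetD]

lemma Afold_dead (bandage : List Int) (maxh : Int) (attacks : List (List Int)) (L : List Int) :
    ∀ (h c : Int),
      (Afold bandage maxh attacks (attacks.map pvKey) L (true, h, c)).1 = true := by
  induction L with
  | nil => intro h c; rfl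
  | cons i t ih =>
    intro h c
    rw [Afold_cons]
    unfold Astep
    by_cases hm : i ∈ attacks.map pvKey
    · rw [if_pos hm, innerA_eq, foldPair_fst_true]
      exact ih _ _
    · rw [if_neg hm]
      exact ih _ _

lemma main_lemma (bandage : List Int) (maxh : Int) (attacks : List (List Int)) (L : List Int) :
    ∀ (h c : Int),
      runB (pvByTime attacks) (PySem.List.pyGetD bandage 0 0) (PySem.List.pyGetD bandage 1 0)
        (PySem.List.pyGetD bandage 2 0) maxh L h c
      = (let s := Afold bandage maxh attacks (attacks.map pvKey) L (false, h, c);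
         if s.1 then -1 else s.2.1) := by
  induction L with
  | nil => intro h c; rfl
  | cons i t ih =>
    intro h c
    rw [Afold_cons]
    unfold Astep
    by_cases hfl : pvFl attacks i = []
    · have hm : ¬ i ∈ attacks.map pvKey := by
        rw [mem_map_key_iff]; simp [hfl]
      rw [if_neg hm]
      simp only [runB, byTime_get?, if_pos hfl]
      exact ih _ _
    · have hm : i ∈ attacks.map pvKey := (mem_map_key_iff attacks i).mpr hfl
      rw [if_pos hm, innerA_eq, if_neg hfl]
      simp only [runB, byTime_get?, if_neg hfl, applyDamages_eq]
      by_cases hd : (foldPair (pvDs attacks i) (false, h)).1 = true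
      · simp [hd, Afold_dead]
      · simp only [if_neg hd]
        rw [ih]
        simp only [Bool.not_eq_true] at hd
        rw [hd]

lemma ports_agree (bandage : List Int) (health : Int) (attacks : List (List Int)) :
    solution bandage health attacks = solution_alt bandage health attacks := by
  rw [solution_eq, solution_alt_eq, main_lemma,
    PySem.List.foldl_append_singleton_eq_map]
  simp only [List.nil_append]
  rfl

-- ===== VERDICT (by name: the statement is the Claim_ definition above) =====
theorem solution_spec : Claim_equal_solution := by
  intro bandage health attacks _ _
  unfold Spec_solution
  exact ports_agree bandage health attacks
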